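-- pv_equiv track=rewrite | github.com/kaly20021110/Raven | benchmark/benchmark/logs.py | _process_faba_stats
-- ===== SOURCE A (Python) =====
-- from collections import defaultdict
--
-- def _process_faba_stats(faba_results):
--     """合并所有节点的FABA统计结果"""
--     merged_stats = defaultdict(dict)
--
--     for node_stats in faba_results:
--         for epoch, stats in node_stats.items():
--             if epoch not in merged_stats:
--                 merged_stats[epoch] = stats.copy()
--             else:
--                 # 如果同一个epoch有多个提交记录，选择调用次数最多的
--                 if stats['invokes_before_commit'] > merged_stats[epoch]['invokes_before_commit']:
--                     merged_stats[epoch] = stats.copy()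
--
--     return dict(merged_stats)
-- ===== SOURCE B (Python) =====
-- def _process_faba_stats(faba_results):
--     """Merge all nodes' FABA stats: index every epoch's stats first, then pick each winner."""
--     groups = {}
--     for node_stats in faba_results:
--         for epoch, stats in node_stats.items():
--             groups.setdefault(epoch, []).append(stats)
--     result = {}
--     for epoch, candidates in groups.items():
--         best = max(candidates, key=lambda s: s.get('invokes_before_commit', 0))
--         result[epoch] = best.copy()
--     return result
-- ===== Notes on version B (the rewrite author's own statement) =====
-- stated objective: alternative
-- what changed: Replaces A's running-max merge into one dict with an index-then-reduce structure: first pass groups every epoch's stats lists in encounter order, second pass selects each epoch's winner with max(key=invokes_before_commit); Pre_ excludes association lists with duplicate keys inside one dict (not representable as a Python dict input) and inputs where a repeated epoch has a stats dict lacking 'invokes_before_commit', on which A raises KeyError.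
import Mathlib
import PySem

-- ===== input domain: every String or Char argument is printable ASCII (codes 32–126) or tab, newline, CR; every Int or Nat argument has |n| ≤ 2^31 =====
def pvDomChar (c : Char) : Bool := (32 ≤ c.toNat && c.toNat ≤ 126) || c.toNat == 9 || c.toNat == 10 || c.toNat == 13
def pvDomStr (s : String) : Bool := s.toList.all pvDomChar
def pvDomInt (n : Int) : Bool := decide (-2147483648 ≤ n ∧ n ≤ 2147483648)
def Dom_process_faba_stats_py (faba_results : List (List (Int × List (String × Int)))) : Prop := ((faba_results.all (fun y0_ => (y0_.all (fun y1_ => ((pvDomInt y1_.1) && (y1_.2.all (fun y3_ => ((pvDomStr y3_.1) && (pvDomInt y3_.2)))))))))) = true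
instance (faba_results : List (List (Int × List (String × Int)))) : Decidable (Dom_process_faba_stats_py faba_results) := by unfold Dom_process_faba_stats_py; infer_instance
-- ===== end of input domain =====

-- B replaces A's running-max merge with an index-then-reduce structure (group stats per epoch, then pick
-- each epoch's winner with max); same cost, different decomposition.


-- shared helper: in A this is stats['invokes_before_commit'] (exact under Pre_, which guarantees the key
-- whenever A evaluates this lookup); in B this is s.get('invokes_before_commit', 0) (exact everywhere).
def pvKey (s : List (String × Int)) : Int :=
  PySem.Dict.getD (PySem.Dict.mk s) "invokes_before_commit" 0

-- ===== PORT A =====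
-- one inner-loop step of A: merge entry (epoch, stats) into merged_stats
def pvStepA (m : PySem.Dict Int (List (String × Int))) (e : Int × List (String × Int)) :
    PySem.Dict Int (List (String × Int)) :=
  if m.contains e.1 = false then m.insert e.1 e.2
  else if pvKey e.2 > pvKey (m.getD e.1 []) then m.insert e.1 e.2 else m

def process_faba_stats_py (faba_results : List (List (Int × List (String × Int)))) : List (Int × List (String × Int)) :=
  (faba_results.foldl (fun merged node_stats => node_stats.foldl pvStepA merged) PySem.Dict.empty).items

-- ===== PORT B =====
-- max(candidates, key=…): groups are built non-empty, so the none branch of max? is never reached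
def pvWinner (cands : List (List (String × Int))) : List (String × Int) :=
  match PySem.List.max? cands pvKey with
  | some best => best
  | none => []

def process_faba_stats_py_alt (faba_results : List (List (Int × List (String × Int)))) : List (Int × List (String × Int)) :=
  let groups : PySem.Dict Int (List (List (String × Int))) :=
    faba_results.foldl (fun g node_stats =>
      node_stats.foldl (fun g e => g.modify e.1 [] (fun l => l ++ [e.2])) g) PySem.Dict.empty
  (groups.items.foldl (fun r p => r.insert p.1 (pvWinner p.2)) PySem.Dict.empty).items

-- ===== PRECONDITION & SPEC =====
def pvHasKey (s : List (String × Int)) : Bool := s.any (fun kv => kv.1 == "invokes_before_commit")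

-- Pre_ excludes (i) association lists with duplicate keys inside one dict — they correspond to no Python
-- dict input — and (ii) inputs where an epoch occurs in several entries and one of its stats dicts lacks
-- 'invokes_before_commit': there the Python A raises KeyError.
def Pre_process_faba_stats_py (faba_results : List (List (Int × List (String × Int)))) : Prop :=
  (∀ ns ∈ faba_results, (ns.map (·.1)).Nodup ∧ ∀ e ∈ ns, (e.2.map (·.1)).Nodup) ∧
  (∀ e ∈ faba_results.flatten, 1 < (faba_results.flatten.map (·.1)).count e.1 → pvHasKey e.2 = true)

instance (faba_results : List (List (Int × List (String × Int)))) : Decidable (Pre_process_faba_stats_py faba_results) := by unfold Pre_process_faba_stats_py; infer_instance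

def pvWitness_process_faba_stats_py : (List (List (Int × List (String × Int)))) :=
  [[(0, [("invokes_before_commit", 1)])], [(0, [("invokes_before_commit", 2)]), (1, [])]]

def Spec_process_faba_stats_py (faba_results : List (List (Int × List (String × Int)))) (out : List (Int × List (String × Int))) : Prop := out = process_faba_stats_py_alt faba_results
instance (faba_results : List (List (Int × List (String × Int)))) (out : List (Int × List (String × Int))) : Decidable (Spec_process_faba_stats_py faba_results out) := by unfold Spec_process_faba_stats_py; infer_instance

-- ===== CLAIM (what is proved, stated in full; the proofs are below) =====
def Claim_equal_process_faba_stats_py : Prop := ∀ (faba_results : List (List (Int × List (String × Int)))), Dom_process_faba_stats_py faba_results → Pre_process_faba_stats_py faba_results → Spec_process_faba_stats_py faba_results (process_faba_stats_py faba_results)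

-- ===== LEMMAS AND PROOFS =====

-- nested loops over a list of lists are one loop over the flattened entry list
lemma pvFoldl_foldl_flatten {α β : Type} (f : β → α → β) (L : List (List α)) (i : β) :
    L.foldl (fun a l => l.foldl f a) i = L.flatten.foldl f i := by
  induction L generalizing i with
  | nil => rfl
  | cons h t ih => simp [List.foldl_append, ih]

lemma pvWinner_singleton (s : List (String × Int)) : pvWinner [s] = s := rfl

lemma pvWinner_append (l : List (List (String × Int))) (s : List (String × Int)) (h : l ≠ []) :
    pvWinner (l ++ [s]) = if pvKey s > pvKey (pvWinner l) then s else pvWinner l := by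
  obtain ⟨m, hm⟩ : ∃ m, PySem.List.max? l pvKey = some m := by
    cases hx : PySem.List.max? l pvKey with
    | none => exact absurd ((PySem.List.max?_eq_none_iff _ _).mp hx) h
    | some m => exact ⟨m, rfl⟩
  have : PySem.List.max? (l ++ [s]) pvKey =
      (if pvKey m < pvKey s then some s else some m) := by
    simp only [PySem.List.max?, List.foldl_append] at hm ⊢
    rw [hm]
    rfl
  simp only [pvWinner, hm, this, gt_iff_lt]
  split_ifs <;> rfl

-- the invariant tying A's merged dict to B's groups dict
def pvRel (m : PySem.Dict Int (List (String × Int)))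
    (g : PySem.Dict Int (List (List (String × Int)))) : Prop :=
  m.keys = g.keys ∧ g.keys.Nodup ∧
  ∀ j : Int, g.contains j = true → g.getD j [] ≠ [] ∧ m.getD j [] = pvWinner (g.getD j [])

lemma pvRel_step (m : PySem.Dict Int (List (String × Int)))
    (g : PySem.Dict Int (List (List (String × Int)))) (e : Int × List (String × Int))
    (h : pvRel m g) : pvRel (pvStepA m e) (g.modify e.1 [] (fun l => l ++ [e.2])) := by
  obtain ⟨hk, hnd, hv⟩ := h
  have hceq : ∀ j : Int, m.contains j = g.contains j := by
    intro j
    rw [PySem.Dict.contains_eq_decide_mem_keys, PySem.Dict.contains_eq_decide_mem_keys, hk]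
  cases hc : g.contains e.1 with
  | false =>
    have hmc : m.contains e.1 = false := by rw [hceq, hc]
    have hstep : pvStepA m e = m.insert e.1 e.2 := by simp [pvStepA, hmc]
    refine ⟨?_, ?_, ?_⟩
    · rw [hstep, PySem.Dict.keys_modify, PySem.Dict.keys_insert_of_not_contains _ _ hmc,
        PySem.Dict.keys_insert_of_not_contains _ _ (by simpa [PySem.Dict.contains, PySem.Dict.getD] using hc), hk]
    · rw [PySem.Dict.keys_modify]
      exact PySem.Dict.nodup_keys_insert _ _ _ hnd
    · intro j hj
      by_cases hje : j = e.1
      · subst hje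
        constructor
        · rw [PySem.Dict.getD_modify_self]
          simp [PySem.Dict.getD_of_not_contains _ _ hc]
        · rw [PySem.Dict.getD_modify_self, hstep, PySem.Dict.getD_insert_self]
          simp [PySem.Dict.getD_of_not_contains _ _ hc, pvWinner_singleton]
      · rw [PySem.Dict.contains_modify] at hj
        have hj' : g.contains j = true := by simpa [hje] using hj
        rw [PySem.Dict.getD_modify, if_neg hje, hstep, PySem.Dict.getD_insert, if_neg hje]
        exact hv j hj'
  | true =>
    have hmc : m.contains e.1 = true := by rw [hceq, hc]
    obtain ⟨hne, hwin⟩ := hv e.1 hc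
    have hkeys : (g.modify e.1 [] (fun l => l ++ [e.2])).keys = g.keys := by
      rw [PySem.Dict.keys_modify,
        PySem.Dict.keys_insert_of_contains _ _ (by simpa [PySem.Dict.contains, PySem.Dict.getD] using hc)]
    have hstep : pvStepA m e =
        if pvKey e.2 > pvKey (pvWinner (g.getD e.1 [])) then m.insert e.1 e.2 else m := by
      simp [pvStepA, hmc, hwin]
    refine ⟨?_, by rw [hkeys]; exact hnd, ?_⟩
    · rw [hkeys, hstep]
      split_ifs
      · rw [PySem.Dict.keys_insert_of_contains _ _ hmc, hk]
      · exact hk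
    · intro j hj
      by_cases hje : j = e.1
      · subst hje
        rw [PySem.Dict.getD_modify_self]
        refine ⟨by simp, ?_⟩
        rw [pvWinner_append _ _ hne, hstep]
        split_ifs with h1
        · exact PySem.Dict.getD_insert_self _ _ _ _
        · exact hwin
      · rw [PySem.Dict.contains_modify] at hj
        have hj' : g.contains j = true := by simpa [hje] using hj
        rw [PySem.Dict.getD_modify, if_neg hje, hstep]
        have := hv j hj'
        split_ifs
        · rw [PySem.Dict.getD_insert, if_neg hje]; exact this
        · exact this

lemma pvRel_foldl (es : List (Int × List (String × Int)))
    (m : PySem.Dict Int (List (String × Int)))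
    (g : PySem.Dict Int (List (List (String × Int)))) (h : pvRel m g) :
    pvRel (es.foldl pvStepA m)
      (es.foldl (fun g e => g.modify e.1 [] (fun l => l ++ [e.2])) g) := by
  induction es generalizing m g with
  | nil => exact h
  | cons e t ih => exact ih _ _ (pvRel_step m g e h)

-- ===== VERDICT (by name: the statement is the Claim_ definition above) =====
theorem process_faba_stats_py_spec : Claim_equal_process_faba_stats_py := by
  intro faba_results _ _
  unfold Spec_process_faba_stats_py process_faba_stats_py process_faba_stats_py_alt
  rw [pvFoldl_foldl_flatten, pvFoldl_foldl_flatten]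
  set es := faba_results.flatten with hes
  have hrel : pvRel (es.foldl pvStepA PySem.Dict.empty)
      (es.foldl (fun g e => g.modify e.1 [] (fun l => l ++ [e.2])) PySem.Dict.empty) := by
    apply pvRel_foldl
    refine ⟨rfl, by simp [PySem.Dict.empty], ?_⟩
    intro j hj
    simp [PySem.Dict.contains_empty] at hj
  set m := es.foldl pvStepA PySem.Dict.empty
  set g := es.foldl (fun g e => g.modify e.1 [] (fun l => l ++ [e.2])) PySem.Dict.empty
  obtain ⟨hk, hnd, hv⟩ := hrel
  have hmnd : m.keys.Nodup := by rw [hk]; exact hnd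
  have hBitems : (g.items.foldl (fun r p => r.insert p.1 (pvWinner p.2)) PySem.Dict.empty).items
      = g.items.map (fun p => (p.1, pvWinner p.2)) := by
    rw [PySem.Dict.items_foldl_insert_fresh g.items (fun p => p.1) (fun p => pvWinner p.2)
        PySem.Dict.empty (fun a _ => PySem.Dict.contains_empty _) (by exact hnd)]
    rfl
  rw [hBitems, PySem.Dict.items_eq_map_keys g hnd [],
    PySem.Dict.items_eq_map_keys m hmnd [], hk, List.map_map]
  refine List.map_congr_left ?_
  intro k hkmem
  have hc : g.contains k = true := (PySem.Dict.contains_iff_mem_keys _ _).mpr hkmem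
  simp [Function.comp, (hv k hc).2]
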